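-- pv_equiv track=rewrite | github.com/MKrawitzky/Ziggy | stan/metrics/mobility_diann.py | _count_missed_cleavages
-- ===== SOURCE A (Python) =====
-- _ENZYME_RULES: dict[str, dict] = {
--     "trypsin":       {"sites": frozenset("KR"),   "blocked_next": frozenset("P"), "direction": "c"},
--     "trypsin_lysc":  {"sites": frozenset("KR"),   "blocked_next": frozenset("P"), "direction": "c"},
--     "lysc":          {"sites": frozenset("K"),    "blocked_next": frozenset(),   "direction": "c"},
--     "argc":          {"sites": frozenset("R"),    "blocked_next": frozenset(),   "direction": "c"},
--     "chymotrypsin":  {"sites": frozenset("FWY"),  "blocked_next": frozenset("P"),"direction": "c"},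
--     "rchymoselect":  {"sites": frozenset("RFWY"), "blocked_next": frozenset(),   "direction": "c"},
--     "krakatoa":      {"sites": frozenset("KR"),   "blocked_next": frozenset(),   "direction": "c"},
--     "vesuvius":      {"sites": frozenset("FWY"),  "blocked_next": frozenset(),   "direction": "c"},
--     "aspn":          {"sites": frozenset("D"),    "blocked_next": frozenset(),   "direction": "n"},
--     "proalanase":    {"sites": frozenset("PA"),   "blocked_next": frozenset(),   "direction": "c"},
--     "pepsin":        {"sites": frozenset("FL"),   "blocked_next": frozenset(),   "direction": "c"},
--     "nonspecific":   {"sites": frozenset(),       "blocked_next": frozenset(),   "direction": "c"},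
-- }
--
-- def _count_missed_cleavages(stripped: str, enzyme: str = "trypsin") -> int:
--     """Count missed cleavages in a bare amino acid sequence for a given enzyme.
--
--     For C-terminal enzymes: counts cleavage-site AAs not at C-terminus
--     and not followed by a blocked AA.
--     For N-terminal enzymes (Asp-N): counts cleavage-site AAs not at
--     N-terminus.
--     Returns 0 for nonspecific digestion.
--     """
--     if not stripped:
--         return 0
--     rules = _ENZYME_RULES.get(enzyme, _ENZYME_RULES["trypsin"])
--     sites = rules["sites"]
--     blocked_next = rules["blocked_next"]
--     direction = rules["direction"]
--
--     if not sites:           # nonspecific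
--         return 0
--
--     seq = stripped.upper()
--     count = 0
--
--     if direction == "c":
--         # cleave after site AA — missed if not at C-terminus and next AA not blocked
--         for i, aa in enumerate(seq[:-1]):
--             if aa in sites and seq[i + 1] not in blocked_next:
--                 count += 1
--     else:
--         # cleave before site AA (Asp-N style) — missed if not at N-terminus
--         for i, aa in enumerate(seq[1:], start=1):
--             if aa in sites:
--                 count += 1
--
--     return count
-- ===== SOURCE B (Python) =====
-- _ENZYME_RULES: dict[str, dict] = {
--     "trypsin":       {"sites": frozenset("KR"),   "blocked_next": frozenset("P"), "direction": "c"},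
--     "trypsin_lysc":  {"sites": frozenset("KR"),   "blocked_next": frozenset("P"), "direction": "c"},
--     "lysc":          {"sites": frozenset("K"),    "blocked_next": frozenset(),   "direction": "c"},
--     "argc":          {"sites": frozenset("R"),    "blocked_next": frozenset(),   "direction": "c"},
--     "chymotrypsin":  {"sites": frozenset("FWY"),  "blocked_next": frozenset("P"),"direction": "c"},
--     "rchymoselect":  {"sites": frozenset("RFWY"), "blocked_next": frozenset(),   "direction": "c"},
--     "krakatoa":      {"sites": frozenset("KR"),   "blocked_next": frozenset(),   "direction": "c"},
--     "vesuvius":      {"sites": frozenset("FWY"),  "blocked_next": frozenset(),   "direction": "c"},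
--     "aspn":          {"sites": frozenset("D"),    "blocked_next": frozenset(),   "direction": "n"},
--     "proalanase":    {"sites": frozenset("PA"),   "blocked_next": frozenset(),   "direction": "c"},
--     "pepsin":        {"sites": frozenset("FL"),   "blocked_next": frozenset(),   "direction": "c"},
--     "nonspecific":   {"sites": frozenset(),       "blocked_next": frozenset(),   "direction": "c"},
-- }
--
--
-- def _count_missed_cleavages(stripped: str, enzyme: str = "trypsin") -> int:
--     """Arithmetic formulation: total site-residue count minus the terminal
--     correction and the count of site+blocked two-letter patterns, all obtained
--     with str.count — no per-boundary scan.  (Correct because every rule's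
--     sites and blocked_next are disjoint, so the two-letter patterns cannot
--     overlap themselves.)"""
--     if not stripped:
--         return 0
--     rules = _ENZYME_RULES.get(enzyme, _ENZYME_RULES["trypsin"])
--     sites = rules["sites"]
--     blocked_next = rules["blocked_next"]
--     seq = stripped.upper()
--     total = sum(seq.count(s) for s in sites)
--     if rules["direction"] == "n":
--         return total - (seq[0] in sites)
--     blocked_pairs = sum(seq.count(s + b) for s in sites for b in blocked_next)
--     return total - (seq[-1] in sites) - blocked_pairs
-- ===== Notes on version B (the rewrite author's own statement) =====
-- stated objective: alternative
-- what changed: Replaces A's per-boundary scan (indexed loop over adjacent residues with set-membership tests) by an arithmetic formulation: total count of site residues (sum of str.count per site letter) minus a terminal-residue correction minus the str.count of each two-letter site+blocked pattern; correct because every rule's site and blocked sets are disjoint, so the two-letter patterns cannot overlap.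
import Mathlib
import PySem

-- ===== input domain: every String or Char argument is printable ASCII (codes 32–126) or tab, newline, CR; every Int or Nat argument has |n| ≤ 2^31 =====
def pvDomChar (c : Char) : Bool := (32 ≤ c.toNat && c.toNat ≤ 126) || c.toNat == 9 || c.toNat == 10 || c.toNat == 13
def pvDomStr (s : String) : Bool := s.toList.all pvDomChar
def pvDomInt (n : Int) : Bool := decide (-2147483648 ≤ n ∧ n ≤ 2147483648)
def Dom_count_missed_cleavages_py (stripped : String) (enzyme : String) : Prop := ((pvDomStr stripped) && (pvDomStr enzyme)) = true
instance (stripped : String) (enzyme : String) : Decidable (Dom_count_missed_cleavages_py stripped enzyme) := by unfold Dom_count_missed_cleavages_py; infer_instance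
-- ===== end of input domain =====

-- B replaces A's per-boundary scan by an arithmetic formulation — total site-residue count minus a terminal correction and the substring counts of site+blocked two-letter patterns (alternative algorithm).


-- _ENZYME_RULES lookup with default "trypsin": (sites, blocked_next, direction == "c")
def pvRules (enzyme : String) : List Char × List Char × Bool :=
  if enzyme = "trypsin" then (['K','R'], ['P'], true)
  else if enzyme = "trypsin_lysc" then (['K','R'], ['P'], true)
  else if enzyme = "lysc" then (['K'], [], true)
  else if enzyme = "argc" then (['R'], [], true)
  else if enzyme = "chymotrypsin" then (['F','W','Y'], ['P'], true)
  else if enzyme = "rchymoselect" then (['R','F','W','Y'], [], true)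
  else if enzyme = "krakatoa" then (['K','R'], [], true)
  else if enzyme = "vesuvius" then (['F','W','Y'], [], true)
  else if enzyme = "aspn" then (['D'], [], false)
  else if enzyme = "proalanase" then (['P','A'], [], true)
  else if enzyme = "pepsin" then (['F','L'], [], true)
  else if enzyme = "nonspecific" then ([], [], true)
  else (['K','R'], ['P'], true)

-- ===== PORT A =====
def count_missed_cleavages_py (stripped : String) (enzyme : String) : Int :=
  if stripped = "" then 0
  else
    let r := pvRules enzyme
    let sites := r.1
    let blocked := r.2.1
    if sites.isEmpty then 0
    else
      let seq := PySem.Chars.upper stripped.toList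
      if r.2.2 then
        -- for i, aa in enumerate(seq[:-1]): if aa in sites and seq[i+1] not in blocked_next
        -- seq[i+1] is always in range here, so pyGetD's default is never used
        (PySem.List.enumerate (PySem.List.slice seq none (some (-1))) 0).foldl
          (fun c x => if sites.contains x.2 && !(blocked.contains (PySem.List.pyGetD seq (x.1 + 1) ' ')) then c + 1 else c) (0 : Int)
      else
        -- for i, aa in enumerate(seq[1:], start=1): if aa in sites
        (PySem.List.enumerate (PySem.List.slice seq (some 1) none) 1).foldl
          (fun c x => if sites.contains x.2 then c + 1 else c) (0 : Int)

-- ===== PORT B =====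
-- total = sum(seq.count(s) for s in sites); subtract the terminal-site indicator and
-- the site+blocked two-letter substring counts sum(seq.count(s + b) ...); no boundary scan.
def count_missed_cleavages_py_alt (stripped : String) (enzyme : String) : Int :=
  if stripped = "" then 0
  else
    let r := pvRules enzyme
    let sites := r.1
    let blocked := r.2.1
    let seq := PySem.Chars.upper stripped.toList
    let total : Int := (sites.map (fun s => ((PySem.Chars.count seq [s] : Nat) : Int))).sum
    if r.2.2 = false then
      -- seq[0] is in range (stripped ≠ ""), so pyGetD's default is never used
      total - (if sites.contains (PySem.List.pyGetD seq 0 ' ') then 1 else 0)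
    else
      let blockedPairs : Int :=
        ((sites.product blocked).map (fun (p : Char × Char) => ((PySem.Chars.count seq [p.1, p.2] : Nat) : Int))).sum
      total - (if sites.contains (PySem.List.pyGetD seq (-1) ' ') then 1 else 0) - blockedPairs

-- ===== PRECONDITION & SPEC =====
def Spec_count_missed_cleavages_py (stripped : String) (enzyme : String) (out : Int) : Prop := out = count_missed_cleavages_py_alt stripped enzyme
instance (stripped : String) (enzyme : String) (out : Int) : Decidable (Spec_count_missed_cleavages_py stripped enzyme out) := by unfold Spec_count_missed_cleavages_py; infer_instance

-- ===== CLAIM (what is proved, stated in full; the proofs are below) =====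
def Claim_equal_count_missed_cleavages_py : Prop := ∀ (stripped : String) (enzyme : String), Dom_count_missed_cleavages_py stripped enzyme → Spec_count_missed_cleavages_py stripped enzyme (count_missed_cleavages_py stripped enzyme)

-- ===== LEMMAS AND PROOFS =====

-- A's C-terminal indexed loop counts exactly the qualifying adjacent pairs.
theorem pvFoldC (p : Char → Char → Bool) (s : List Char) :
    ∀ (t u : List Char), u ++ t = s → ∀ c : Int,
    (PySem.List.enumerate t.dropLast (u.length : Int)).foldl
        (fun c x => if p x.2 (PySem.List.pyGetD s (x.1 + 1) ' ') then c + 1 else c) c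
      = c + ((t.zip t.tail).countP (fun x => p x.1 x.2) : Nat) := by
  intro t
  induction t with
  | nil => intro u _ c; simp [PySem.List.enumerate_nil]
  | cons a t' ih =>
    intro u hu c
    cases t' with
    | nil => simp [PySem.List.enumerate_nil]
    | cons b t'' =>
      have hget : PySem.List.pyGetD s ((u.length : Int) + 1) ' ' = b := by
        have : ((u.length : Int) + 1) = ((u.length + 1 : Nat) : Int) := by push_cast; ring
        rw [this, PySem.List.pyGetD_natCast, ← hu]
        have : u ++ a :: b :: t'' = (u ++ [a]) ++ b :: t'' := by simp
        rw [this]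
        simp [List.getD]
      have hstep := ih (u ++ [a]) (by simpa using hu)
      simp only [List.dropLast_cons_of_ne_nil (List.cons_ne_nil b t''),
        PySem.List.enumerate_cons, List.foldl_cons, hget]
      rw [show (u.length : Int) + 1 = (((u ++ [a]).length : Nat) : Int) by simp]
      rw [hstep]
      simp only [List.zip_cons_cons, List.tail_cons, List.countP_cons]
      split <;> push_cast <;> ring

-- A's N-terminal loop (index unused) counts exactly with countP.
theorem pvFoldN (p : Char → Bool) :
    ∀ (t : List Char) (k : Int) (c : Int),
    (PySem.List.enumerate t k).foldl (fun c x => if p x.2 then c + 1 else c) c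
      = c + (t.countP p : Nat) := by
  intro t
  induction t with
  | nil => intro k c; simp [PySem.List.enumerate_nil]
  | cons a t' ih =>
    intro k c
    simp only [PySem.List.enumerate_cons, List.foldl_cons, List.countP_cons]
    rw [ih]
    split <;> push_cast <;> ring

-- Python s.count(c) for a single character is the character count.
theorem pvCountGoSingle (c : Char) :
    ∀ (fuel : Nat) (l : List Char) (acc : Nat), l.length ≤ fuel →
    PySem.Chars.count.go [c] fuel l acc = acc + l.count c := by
  intro fuel
  induction fuel with
  | zero =>
    intro l acc h
    have : l = [] := List.eq_nil_of_length_eq_zero (Nat.le_zero.mp h)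
    subst this
    simp [PySem.Chars.count.go]
  | succ f ih =>
    intro l acc h
    cases l with
    | nil => simp [PySem.Chars.count.go]
    | cons a t =>
      have ht : t.length ≤ f := by simpa using Nat.lt_succ_iff.mp (Nat.lt_of_lt_of_le (by simp) h)
      simp only [PySem.Chars.count.go]
      by_cases hac : a = c
      · subst hac
        rw [if_pos (by simp [List.isPrefixOf])]
        simp only [List.length_cons, List.length_nil, List.drop_succ_cons, List.drop_zero]
        rw [ih t (acc + 1) ht]
        simp [List.count_cons]
        omega
      · rw [if_neg (by simp [List.isPrefixOf]; exact fun hh => hac hh.symm)]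
        rw [ih t acc ht]
        simp [hac]

theorem pvCountSingle (c : Char) (l : List Char) :
    PySem.Chars.count l [c] = l.count c := by
  simp [PySem.Chars.count]
  simpa using pvCountGoSingle c l.length l 0 le_rfl

-- A matching pair occurrence cannot start at the second letter (s ≠ b).
theorem pvPairTailShift (s b : Char) (hsb : s ≠ b) (t : List Char) :
    ((b :: t).zip t).countP (fun x => x.1 == s && x.2 == b)
      = (t.zip t.tail).countP (fun x => x.1 == s && x.2 == b) := by
  cases t with
  | nil => simp
  | cons h t' => simp [List.countP_cons, Ne.symm hsb]

-- Python s.count(s₁s₂) for a two-letter pattern with distinct letters counts the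
-- matching adjacent pairs (distinct letters ⇒ occurrences cannot overlap).
theorem pvCountGoPair (s b : Char) (hsb : s ≠ b) :
    ∀ (fuel : Nat) (l : List Char) (acc : Nat), l.length ≤ fuel →
    PySem.Chars.count.go [s, b] fuel l acc
      = acc + (l.zip l.tail).countP (fun x => x.1 == s && x.2 == b) := by
  intro fuel
  induction fuel with
  | zero =>
    intro l acc h
    have : l = [] := List.eq_nil_of_length_eq_zero (Nat.le_zero.mp h)
    subst this
    simp [PySem.Chars.count.go]
  | succ f ih =>
    intro l acc h
    cases l with
    | nil => simp [PySem.Chars.count.go]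
    | cons a t =>
      have ht : t.length ≤ f := by simpa using Nat.lt_succ_iff.mp (Nat.lt_of_lt_of_le (by simp) h)
      simp only [PySem.Chars.count.go]
      cases t with
      | nil =>
        rw [if_neg (by simp [List.isPrefixOf])]
        cases f <;> simp [PySem.Chars.count.go]
      | cons b' t' =>
        by_cases hm : a = s ∧ b' = b
        · obtain ⟨rfl, rfl⟩ := hm
          rw [if_pos (by simp [List.isPrefixOf])]
          simp only [List.length_cons, List.length_nil, List.drop_succ_cons, List.drop_zero]
          rw [ih t' (acc + 1) (by simp at ht ⊢; omega)]
          simp only [List.zip_cons_cons, List.tail_cons, List.countP_cons, beq_self_eq_true,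
            Bool.and_self, if_pos]
          rw [pvPairTailShift _ _ hsb t']
          omega
        · have hpre : List.isPrefixOf [s, b] (a :: b' :: t') = false := by
            simp [List.isPrefixOf]
            intro h1 h2; exact hm ⟨h1.symm, h2.symm⟩
          rw [if_neg (by simp [hpre])]
          rw [ih (b' :: t') acc ht]
          simp only [List.zip_cons_cons, List.tail_cons, List.countP_cons]
          have : ((a == s) && (b' == b)) = false := by
            by_cases h1 : a = s <;> by_cases h2 : b' = b <;> simp_all
          simp [this]

theorem pvCountPair (s b : Char) (hsb : s ≠ b) (l : List Char) :
    PySem.Chars.count l [s, b] = (l.zip l.tail).countP (fun x => x.1 == s && x.2 == b) := by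
  simp [PySem.Chars.count]
  simpa using pvCountGoPair s b hsb l.length l 0 le_rfl

theorem pvSumIndicator {α : Type} [BEq α] [LawfulBEq α] (x : α) :
    ∀ (keys : List α), (keys.map (fun k => if x == k then 1 else 0)).sum = keys.count x := by
  intro keys
  induction keys with
  | nil => simp
  | cons k ks ihk =>
    simp only [List.map_cons, List.sum_cons, List.count_cons, ihk]
    by_cases h : x = k
    · subst h; simp; omega
    · simp [h, Ne.symm h]

-- countP of membership in a Nodup key list = sum of the individual counts.
theorem pvCountPContains {α : Type} [BEq α] [LawfulBEq α] (keys : List α) (hn : keys.Nodup) :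
    ∀ (l : List α), l.countP (fun x => keys.contains x) = (keys.map (fun k => l.count k)).sum := by
  intro l
  induction l with
  | nil => simp
  | cons x l ih =>
    simp only [List.countP_cons, List.count_cons]
    rw [show (keys.map (fun k => l.count k + if x == k then 1 else 0)).sum
        = (keys.map (fun k => l.count k)).sum + (keys.map (fun k => if x == k then 1 else 0)).sum from by
      rw [← List.sum_map_add]]
    rw [ih, pvSumIndicator]
    by_cases hx : x ∈ keys
    · have : keys.count x = 1 := List.count_eq_one_of_mem hn hx
      simp [this, hx]
    · have : keys.count x = 0 := List.count_eq_zero_of_not_mem hx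
      simp [this, hx]

theorem pvSplitAnd {α : Type} (p q : α → Bool) :
    ∀ (l : List α), l.countP (fun x => p x && !q x) + l.countP (fun x => p x && q x) = l.countP p := by
  intro l
  induction l with
  | nil => simp
  | cons x l ih =>
    simp only [List.countP_cons]
    by_cases hp : p x <;> by_cases hq : q x <;> simp [hp, hq] <;> omega

theorem pvMapFstZipTail (seq : List Char) :
    (seq.zip seq.tail).map Prod.fst = seq.dropLast := by
  induction seq with
  | nil => simp
  | cons a t ih =>
    cases t with
    | nil => simp
    | cons b t' => simp only [List.tail_cons, List.zip_cons_cons, List.map_cons,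
        List.dropLast_cons_of_ne_nil (List.cons_ne_nil b t')]
                   exact congrArg (a :: ·) (by simpa using ih)

-- Core identity (C-terminal case): boundary-pair count + terminal indicator +
-- blocked-pattern counts = total site-residue count.
theorem pvMainC (sites blocked : List Char) (hs : sites.Nodup) (hb : blocked.Nodup)
    (hdisj : ∀ s ∈ sites, ∀ b ∈ blocked, s ≠ b) (seq : List Char) (hne : seq ≠ []) :
    (seq.zip seq.tail).countP (fun x => sites.contains x.1 && !(blocked.contains x.2))
      + (if sites.contains (seq.getLast hne) then 1 else 0)
      + ((sites.product blocked).map (fun p => PySem.Chars.count seq [p.1, p.2])).sum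
    = (sites.map (fun s => PySem.Chars.count seq [s])).sum := by
  have hR : (sites.map (fun s => PySem.Chars.count seq [s])).sum = seq.countP (fun x => sites.contains x) := by
    rw [pvCountPContains sites hs seq]
    exact congrArg List.sum (List.map_congr_left (fun s _ => pvCountSingle s seq))
  have hfst : (seq.zip seq.tail).countP (fun x => sites.contains x.1)
      = seq.dropLast.countP (fun x => sites.contains x) := by
    rw [← pvMapFstZipTail seq, List.countP_map]
    rfl
  have hsplitLast : seq.countP (fun x => sites.contains x)
      = seq.dropLast.countP (fun x => sites.contains x)
        + (if sites.contains (seq.getLast hne) then 1 else 0) := by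
    conv_lhs => rw [← List.dropLast_append_getLast hne]
    rw [List.countP_append]
    simp
  have hblk : ((sites.product blocked).map (fun p => PySem.Chars.count seq [p.1, p.2])).sum
      = (seq.zip seq.tail).countP (fun x => sites.contains x.1 && blocked.contains x.2) := by
    have hpred : (seq.zip seq.tail).countP (fun x => sites.contains x.1 && blocked.contains x.2)
        = (seq.zip seq.tail).countP (fun x => (sites.product blocked).contains x) := by
      apply List.countP_congr
      intro x _
      cases x with
      | mk x1 x2 => simp [List.pair_mem_product]
    rw [hpred, pvCountPContains (sites.product blocked) (List.Nodup.product hs hb)]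
    apply congrArg List.sum
    apply List.map_congr_left
    intro p hp
    cases p with
    | mk s b =>
      have hmem := (List.pair_mem_product).mp hp
      rw [pvCountPair s b (hdisj s hmem.1 b hmem.2) seq]
      rfl
  rw [hR, hsplitLast, ← hfst, hblk]
  rw [← pvSplitAnd (fun x => sites.contains x.1) (fun x => blocked.contains x.2) (seq.zip seq.tail)]
  ring

-- Core identity (N-terminal case): tail count + head indicator = total count.
theorem pvMainN (sites : List Char) (hs : sites.Nodup) (seq : List Char) (hne : seq ≠ []) :
    seq.tail.countP (fun x => sites.contains x)
      + (if sites.contains (seq.head hne) then 1 else 0)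
    = (sites.map (fun s => PySem.Chars.count seq [s])).sum := by
  have hR : (sites.map (fun s => PySem.Chars.count seq [s])).sum = seq.countP (fun x => sites.contains x) := by
    rw [pvCountPContains sites hs seq]
    exact congrArg List.sum (List.map_congr_left (fun s _ => pvCountSingle s seq))
  rw [hR]
  cases seq with
  | nil => exact absurd rfl hne
  | cons a t =>
    simp only [List.tail_cons, List.head_cons, List.countP_cons]
    by_cases h : sites.contains a <;> simp [h]

-- Python seq[-1] / seq[0] on a non-empty list.
theorem pvGetNegOne (seq : List Char) (hne : seq ≠ []) :
    PySem.List.pyGetD seq (-1) ' ' = seq.getLast hne := by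
  have hlen : 1 ≤ seq.length := List.length_pos_iff.mpr hne
  simp only [PySem.List.pyGetD, PySem.List.pyGet?, PySem.List.pyIdx?]
  rw [if_neg (by omega), if_pos (by omega)]
  rw [show (-(-1 : Int)).toNat = 1 from by decide]
  rw [Option.bind]
  simp [List.getElem?_eq_getElem (show seq.length - 1 < seq.length by omega), List.getLast_eq_getElem]

theorem pvGetZero (seq : List Char) (hne : seq ≠ []) :
    PySem.List.pyGetD seq 0 ' ' = seq.head hne := by
  have hlen : 1 ≤ seq.length := List.length_pos_iff.mpr hne
  simp only [PySem.List.pyGetD, PySem.List.pyGet?, PySem.List.pyIdx?]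
  rw [if_pos le_rfl, if_pos (by omega)]
  rw [Option.bind]
  simp [List.getElem?_eq_getElem (show 0 < seq.length by omega), List.head_eq_getElem]

-- Every rule tuple has Nodup sites and blocked lists with disjoint letters.
theorem pvRulesOK (enzyme : String) :
    (pvRules enzyme).1.Nodup ∧ (pvRules enzyme).2.1.Nodup ∧
      ∀ s ∈ (pvRules enzyme).1, ∀ b ∈ (pvRules enzyme).2.1, s ≠ b := by
  by_cases h1 : enzyme = "trypsin"
  · rw [h1, show pvRules "trypsin" = (['K','R'], ['P'], true) from rfl]
    exact ⟨by decide, by decide, by simp⟩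
  · by_cases h2 : enzyme = "trypsin_lysc"
    · rw [h2, show pvRules "trypsin_lysc" = (['K','R'], ['P'], true) from rfl]
      exact ⟨by decide, by decide, by simp⟩
    · by_cases h3 : enzyme = "lysc"
      · rw [h3, show pvRules "lysc" = (['K'], [], true) from rfl]
        exact ⟨by decide, by decide, by simp⟩
      · by_cases h4 : enzyme = "argc"
        · rw [h4, show pvRules "argc" = (['R'], [], true) from rfl]
          exact ⟨by decide, by decide, by simp⟩
        · by_cases h5 : enzyme = "chymotrypsin"
          · rw [h5, show pvRules "chymotrypsin" = (['F','W','Y'], ['P'], true) from rfl]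
            exact ⟨by decide, by decide, by simp⟩
          · by_cases h6 : enzyme = "rchymoselect"
            · rw [h6, show pvRules "rchymoselect" = (['R','F','W','Y'], [], true) from rfl]
              exact ⟨by decide, by decide, by simp⟩
            · by_cases h7 : enzyme = "krakatoa"
              · rw [h7, show pvRules "krakatoa" = (['K','R'], [], true) from rfl]
                exact ⟨by decide, by decide, by simp⟩
              · by_cases h8 : enzyme = "vesuvius"
                · rw [h8, show pvRules "vesuvius" = (['F','W','Y'], [], true) from rfl]
                  exact ⟨by decide, by decide, by simp⟩
                · by_cases h9 : enzyme = "aspn"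
                  · rw [h9, show pvRules "aspn" = (['D'], [], false) from rfl]
                    exact ⟨by decide, by decide, by simp⟩
                  · by_cases h10 : enzyme = "proalanase"
                    · rw [h10, show pvRules "proalanase" = (['P','A'], [], true) from rfl]
                      exact ⟨by decide, by decide, by simp⟩
                    · by_cases h11 : enzyme = "pepsin"
                      · rw [h11, show pvRules "pepsin" = (['F','L'], [], true) from rfl]
                        exact ⟨by decide, by decide, by simp⟩
                      · by_cases h12 : enzyme = "nonspecific"
                        · rw [h12, show pvRules "nonspecific" = ([], [], true) from rfl]
                          exact ⟨by decide, by decide, by simp⟩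
                        · rw [show pvRules enzyme = (['K','R'], ['P'], true) from by
                            unfold pvRules
                            rw [if_neg h1, if_neg h2, if_neg h3, if_neg h4, if_neg h5, if_neg h6,
                              if_neg h7, if_neg h8, if_neg h9, if_neg h10, if_neg h11, if_neg h12]]
                          exact ⟨by decide, by decide, by simp⟩

theorem pvSumCast {α : Type} (l : List α) (f : α → Nat) :
    (l.map (fun a => ((f a : Nat) : Int))).sum = (((l.map f).sum : Nat) : Int) := by
  induction l with
  | nil => simp
  | cons a l ih => simp [ih]

-- ===== VERDICT (by name: the statement is the Claim_ definition above) =====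
theorem count_missed_cleavages_py_spec : Claim_equal_count_missed_cleavages_py := by
  intro stripped enzyme _
  unfold Spec_count_missed_cleavages_py
  by_cases hstr : stripped = ""
  · simp [count_missed_cleavages_py, count_missed_cleavages_py_alt, hstr]
  · obtain ⟨hsN, hbN, hdisj⟩ := pvRulesOK enzyme
    rcases hr : pvRules enzyme with ⟨sites, blocked, dir⟩
    rw [hr] at hsN hbN hdisj
    simp only at hsN hbN hdisj
    have hne : PySem.Chars.upper stripped.toList ≠ [] := by
      simp only [PySem.Chars.upper, ne_eq, List.map_eq_nil_iff]
      intro hc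
      exact hstr (by rwa [← String.toList_eq_nil_iff])
    simp only [count_missed_cleavages_py, count_missed_cleavages_py_alt, hr, if_neg hstr]
    by_cases hemp : sites.isEmpty
    · have hnil : sites = [] := List.isEmpty_iff.mp hemp
      subst hnil
      cases dir <;> simp [List.product]
    · rw [if_neg hemp]
      cases dir with
      | true =>
        rw [if_pos rfl, if_neg (by simp)]
        have hA := pvFoldC (fun a b => sites.contains a && !(blocked.contains b))
          (PySem.Chars.upper stripped.toList) (PySem.Chars.upper stripped.toList) [] rfl 0
        rw [PySem.List.slice_to_neg_one]
        simp only [List.nil_append, List.length_nil, Nat.cast_zero, zero_add] at hA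
        rw [hA, pvGetNegOne _ hne,
          pvSumCast sites (fun s => PySem.Chars.count (PySem.Chars.upper stripped.toList) [s]),
          pvSumCast (sites.product blocked)
            (fun p => PySem.Chars.count (PySem.Chars.upper stripped.toList) [p.1, p.2])]
        have hm := congrArg (fun n : Nat => (n : Int))
          (pvMainC sites blocked hsN hbN hdisj (PySem.Chars.upper stripped.toList) hne)
        push_cast at hm ⊢
        linarith [hm]
      | false =>
        rw [if_neg (by simp), if_pos rfl]
        have hA := pvFoldN (fun a => sites.contains a)
          (PySem.List.slice (PySem.Chars.upper stripped.toList) (some 1) none) 1 0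
        rw [PySem.List.slice_from_one] at hA ⊢
        simp only [zero_add] at hA
        rw [hA, pvGetZero _ hne,
          pvSumCast sites (fun s => PySem.Chars.count (PySem.Chars.upper stripped.toList) [s])]
        have hm := congrArg (fun n : Nat => (n : Int))
          (pvMainN sites hsN (PySem.Chars.upper stripped.toList) hne)
        push_cast at hm ⊢
        linarith [hm]
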